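-- pv_equiv track=rewrite | github.com/MaxwellMasaitis/Steinhaus-Graph-Research | CN2.py | _d
-- ===== SOURCE A (Python) =====
-- def invert(bitString):
--    """Returns the bit string with the bits inverted."""
--    invertedString = ''
--    for bit in bitString:
--       if bit == '1':
--          invertedString += '0'
--       else:
--          invertedString += '1'
--    return invertedString
--
-- def _d(n):
--     ### ACTUALLY IT'S d'n NOW
--     b = n - 2
--     d = 0
--     mainString = str(bin(b))[2:]
--     # Exclude the rightmost 2 and try to find a 0 on the right
--     index = mainString[:-2].rfind("0")
--     # range is index + 1, since just 'index' doesn't include the index itself, dummy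
--     for i in range(2,index + 1):
--         if mainString[i] == "0":
--             subString = invert(mainString[i+1:])
--             d = d + int(subString,2)
--     return d
-- ===== SOURCE B (Python) =====
-- def _d(n):
--     b = n - 2
--     d = 0
--     mainString = str(bin(b))[2:]
--     index = mainString[:-2].rfind("0")
--     # single right-to-left pass: val = int(mainString[i+1:], 2), m = its length,
--     # maintained incrementally; a zero at i contributes (2**m - 1) - val
--     val = 0
--     m = 0
--     for i in range(len(mainString) - 1, 1, -1):
--         if i <= index and mainString[i] == "0":
--             d += (1 << m) - 1 - val
--         if mainString[i] == "1":
--             val += 1 << m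
--         m += 1
--     return d
-- ===== Notes on version B (the rewrite author's own statement) =====
-- stated objective: alternative
-- what changed: A rebuilds, inverts and reparses the whole binary suffix for every zero position (invert + int(...,2) per iteration); B makes one right-to-left pass maintaining the suffix value and bit-length incrementally and adds each zero's contribution as (2**m - 1) - val.
import Mathlib
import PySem

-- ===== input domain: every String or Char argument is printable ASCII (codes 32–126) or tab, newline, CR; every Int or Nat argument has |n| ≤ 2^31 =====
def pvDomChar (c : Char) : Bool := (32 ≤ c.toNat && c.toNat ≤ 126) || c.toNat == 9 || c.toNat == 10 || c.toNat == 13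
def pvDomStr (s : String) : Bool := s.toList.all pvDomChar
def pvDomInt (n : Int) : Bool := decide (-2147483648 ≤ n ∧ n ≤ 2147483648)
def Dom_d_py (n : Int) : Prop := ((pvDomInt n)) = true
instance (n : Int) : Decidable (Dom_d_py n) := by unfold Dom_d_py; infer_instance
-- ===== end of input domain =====

-- B replaces A's per-position rebuild-and-reparse of the inverted suffix by one right-to-left
-- pass that maintains the suffix value incrementally (objective: alternative decomposition).

-- ===== PORT A =====
-- invert(bitString)
def pvInvert (s : List Char) : List Char := s.map (fun c => if c = '1' then '0' else '1')
-- int(t, 2) for t consisting only of '0'/'1' (the only strings A parses)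
def pvParse2 (s : List Char) : Int := s.foldl (fun a c => 2 * a + (if c = '1' then 1 else 0)) 0
-- binary digits of a positive Nat, most significant first (how bin builds them)
def pvNatBitsGo (n : Nat) (acc : List Char) : List Char :=
  if h : n = 0 then acc
  else pvNatBitsGo (n / 2) ((if n % 2 = 1 then '1' else '0') :: acc)
  termination_by n
  decreasing_by exact Nat.div_lt_self (Nat.pos_of_ne_zero h) one_lt_two
-- str(bin(b))[2:] : digits of b for b ≥ 0 ('0' for 0), and 'b' ++ digits of -b for b < 0
def pvBin (b : Int) : List Char :=
  if 0 ≤ b then (if b = 0 then ['0'] else pvNatBitsGo b.toNat [])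
  else 'b' :: pvNatBitsGo (-b).toNat []
-- t.rfind("0") : last index of '0', -1 if absent
def pvRfind0 (t : List Char) : Int :=
  match t.reverse.findIdx? (fun c => c = '0') with
  | some k => (t.length : Int) - 1 - k
  | none => -1

def d_py (n : Int) : Int :=
  let b := n - 2
  let mainString := pvBin b
  -- mainString[:-2] = take (length - 2)  (PySem.List.slice_to_neg_ofNat)
  let index := pvRfind0 (mainString.take (mainString.length - 2))
  -- for i in range(2, index+1): indices hit satisfy 2 ≤ i ≤ index < length, so pyGetD never
  -- reaches its default; mainString[i+1:] is drop (i+1) with i+1 > 0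
  (PySem.List.pyRange 2 (index + 1) 1).foldl
    (fun d i =>
      if PySem.List.pyGetD mainString i ' ' = '0' then
        d + pvParse2 (pvInvert (mainString.drop (i + 1).toNat))
      else d) 0

-- ===== PORT B =====
-- the right-to-left loop of Source B: i counts down to 2; val = int(mainString[i+1:], 2), m its
-- length, both maintained incrementally (the two sequential ifs of the Python body)
def pvAltGo (s : List Char) (index : Int) (i : Nat) (d val : Int) (m : Nat) : Int :=
  if h : i < 2 then d
  else
    pvAltGo s index (i - 1)
      (if (i : Int) ≤ index ∧ s.getD i ' ' = '0' then d + (2 ^ m - 1 - val) else d)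
      (if s.getD i ' ' = '1' then val + 2 ^ m else val)
      (m + 1)
  termination_by i
  decreasing_by omega

def d_py_alt (n : Int) : Int :=
  let b := n - 2
  let mainString := pvBin b
  let index := pvRfind0 (mainString.take (mainString.length - 2))
  pvAltGo mainString index (mainString.length - 1) 0 0 0

-- ===== PRECONDITION & SPEC =====
def Spec_d_py (n : Int) (out : Int) : Prop := out = d_py_alt n
instance (n : Int) (out : Int) : Decidable (Spec_d_py n out) := by unfold Spec_d_py; infer_instance

-- ===== CLAIM (what is proved, stated in full; the proofs are below) =====
def Claim_equal_d_py : Prop := ∀ (n : Int), Dom_d_py n → Spec_d_py n (d_py n)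

-- ===== LEMMAS AND PROOFS =====

-- contribution of position j (0 unless 2 ≤ j ≤ index and the bit there is '0')
def pvTerm (s : List Char) (idx : Int) (j : Nat) : Int :=
  if 2 ≤ j ∧ (j : Int) ≤ idx ∧ s.getD j ' ' = '0' then
    pvParse2 (pvInvert (s.drop (j + 1)))
  else 0

-- sum of pvTerm over j < i
def pvAsum (s : List Char) (idx : Int) : Nat → Int
  | 0 => 0
  | i + 1 => pvAsum s idx i + pvTerm s idx i

lemma parse2_foldl (t : List Char) : ∀ a : Int,
    t.foldl (fun a c => 2 * a + (if c = '1' then 1 else 0)) a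
      = a * 2 ^ t.length + pvParse2 t := by
  induction t with
  | nil => intro a; simp [pvParse2]
  | cons c t ih =>
      intro a
      simp only [List.foldl_cons, pvParse2, List.length_cons]
      rw [ih, ih (2 * 0 + (if c = '1' then 1 else 0))]
      ring

lemma parse2_cons (c : Char) (t : List Char) :
    pvParse2 (c :: t) = (if c = '1' then 1 else 0) * 2 ^ t.length + pvParse2 t := by
  have h := parse2_foldl t (2 * 0 + (if c = '1' then 1 else 0))
  simp only [pvParse2, List.foldl_cons] at *
  rw [h]; ring

lemma parse2_invert (t : List Char) (hb : ∀ c ∈ t, c = '0' ∨ c = '1') :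
    pvParse2 (pvInvert t) = 2 ^ t.length - 1 - pvParse2 t := by
  induction t with
  | nil => simp [pvParse2, pvInvert]
  | cons c t ih =>
      have hc := hb c (by simp)
      have ih' := ih (fun x hx => hb x (by simp [hx]))
      simp only [pvInvert, List.map_cons] at *
      rw [parse2_cons, parse2_cons, ih']
      have hl : (List.map (fun c => if c = '1' then '0' else '1') t).length = t.length := by simp
      rw [hl]
      rcases hc with h | h <;> subst h <;> simp [pow_succ] <;> ring

lemma bitsGo_bits (n : Nat) : ∀ (acc : List Char), (∀ c ∈ acc, c = '0' ∨ c = '1') →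
    ∀ c ∈ pvNatBitsGo n acc, c = '0' ∨ c = '1' := by
  induction n using Nat.strong_induction_on with
  | _ n ih =>
      intro acc hacc c hc
      rw [pvNatBitsGo] at hc
      split at hc
      · exact hacc c hc
      · rename_i hn
        exact ih (n / 2) (Nat.div_lt_self (Nat.pos_of_ne_zero hn) one_lt_two)
          _ (by
            intro x hx
            rcases List.mem_cons.mp hx with h | h
            · subst h; split <;> simp
            · exact hacc x h) c hc

lemma bitsGo_len (n : Nat) : ∀ (acc : List Char), acc.length ≤ (pvNatBitsGo n acc).length := by
  induction n using Nat.strong_induction_on with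
  | _ n ih =>
      intro acc
      rw [pvNatBitsGo]
      split
      · exact le_refl _
      · rename_i hn
        calc acc.length ≤ ((if n % 2 = 1 then '1' else '0') :: acc).length := by simp
          _ ≤ _ := ih (n / 2) (Nat.div_lt_self (Nat.pos_of_ne_zero hn) one_lt_two) _

lemma bitsGo_ne_nil (n : Nat) (acc : List Char) (hn : n ≠ 0) : pvNatBitsGo n acc ≠ [] := by
  rw [pvNatBitsGo, dif_neg hn]
  have h := bitsGo_len (n / 2) ((if n % 2 = 1 then '1' else '0') :: acc)
  intro h0
  rw [h0] at h
  simp at h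

lemma pvBin_ne_nil (b : Int) : pvBin b ≠ [] := by
  unfold pvBin
  split
  · split
    · simp
    · rename_i hb hb0
      exact bitsGo_ne_nil _ _ (by omega)
  · simp

lemma pvBin_tail_bits (b : Int) : ∀ c ∈ (pvBin b).drop 1, c = '0' ∨ c = '1' := by
  unfold pvBin
  split
  · split
    · simp
    · intro c hc
      exact bitsGo_bits _ [] (by simp) c (List.drop_subset 1 _ hc)
  · intro c hc
    simp only [List.drop_one, List.tail_cons] at hc
    exact bitsGo_bits _ [] (by simp) c hc

lemma pvRfind0_le (t : List Char) : pvRfind0 t ≤ (t.length : Int) - 1 := by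
  unfold pvRfind0
  split <;> omega

-- the B loop accumulates exactly the pvTerm contributions of positions ≤ i
lemma altGo_eq (s : List Char) (idx : Int)
    (hb : ∀ c ∈ s.drop 1, c = '0' ∨ c = '1') :
    ∀ (i : Nat) (d val : Int), i < s.length → val = pvParse2 (s.drop (i + 1)) →
      pvAltGo s idx i d val (s.length - (i + 1)) = d + pvAsum s idx (i + 1) := by
  intro i
  induction i with
  | zero =>
      intro d val _ _
      rw [pvAltGo]
      simp [pvAsum, pvTerm]
  | succ i ih =>
      intro d val hlen hval
      rw [pvAltGo]
      by_cases h2 : i + 1 < 2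
      · have hi0 : i = 0 := by omega
        subst hi0
        rw [dif_pos h2]
        simp [pvAsum, pvTerm]
      · rw [dif_neg h2]
        have hi1 : i + 1 < s.length := hlen
        have hgd : s.getD (i + 1) ' ' = s[i + 1] := by
          rw [List.getD_eq_getElem?_getD, List.getElem?_eq_getElem hi1]; rfl
        have hdrop : s.drop (i + 1) = s[i + 1] :: s.drop (i + 1 + 1) :=
          List.drop_eq_getElem_cons hi1
        have hmem : s[i + 1] ∈ s.drop 1 := by
          have h1 : s[i + 1] ∈ s.drop (i + 1) := by
            rw [hdrop]; exact List.mem_cons_self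
          have hdd : (s.drop 1).drop i = s.drop (i + 1) := by
            rw [List.drop_drop]; congr 1; omega
          exact List.drop_subset _ _ (hdd ▸ h1)
        have hbit := hb _ hmem
        have hlen2 : (s.drop (i + 1 + 1)).length = s.length - (i + 1 + 1) := by simp
        have hval' : (if s.getD (i + 1) ' ' = '1' then val + 2 ^ (s.length - (i + 1 + 1)) else val)
            = pvParse2 (s.drop (i + 1)) := by
          rw [hgd, hval, hdrop, parse2_cons, hlen2]
          rcases hbit with h | h <;> rw [h] <;> simp [Int.add_comm]
        have hm : s.length - (i + 1 + 1) + 1 = s.length - (i + 1) := by omega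
        rw [Nat.add_sub_cancel, hm, hval', ih _ _ (by omega) rfl]
        have hbits2 : ∀ c ∈ s.drop (i + 1 + 1), c = '0' ∨ c = '1' := by
          intro c hc
          apply hb
          have hd : (s.drop 1).drop (i + 1) = s.drop (i + 1 + 1) := by
            rw [List.drop_drop]; congr 1; omega
          rw [← hd] at hc
          exact List.drop_subset _ _ hc
        have hP : pvParse2 (pvInvert (s.drop (i + 1 + 1)))
            = 2 ^ (s.length - (i + 1 + 1)) - 1 - pvParse2 (s.drop (i + 1 + 1)) := by
          rw [parse2_invert _ hbits2, hlen2]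
        have hA : pvAsum s idx (i + 1 + 1) = pvAsum s idx (i + 1) + pvTerm s idx (i + 1) := rfl
        rw [hA]
        unfold pvTerm
        rw [hP, hgd, hval]
        have h2' : 2 ≤ i + 1 := by omega
        split_ifs with hc1 hc2 hc2
        · ring
        · exact absurd ⟨h2', hc1.1, hc1.2⟩ hc2
        · exact absurd ⟨hc2.2.1, hc2.2.2⟩ hc1
        · ring

-- A's loop over range(2, index+1) accumulates the same contributions
lemma afold (s : List Char) (idx : Int) :
    ∀ (k : Nat) (d : Int), 2 + (k : Int) ≤ idx + 1 →
      (PySem.List.pyRange 2 (2 + (k : Int)) 1).foldl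
        (fun d i =>
          if PySem.List.pyGetD s i ' ' = '0' then
            d + pvParse2 (pvInvert (s.drop (i + 1).toNat))
          else d) d
        = d + pvAsum s idx (2 + k) := by
  intro k
  induction k with
  | zero =>
      intro d _
      rw [show ((2 : Int) + ((0 : Nat) : Int)) = 2 by norm_num,
        PySem.List.pyRange_one_eq_nil (le_refl 2)]
      simp [pvAsum, pvTerm]
  | succ k ih =>
      intro d hk
      have hsplit : (2 : Int) + ((k + 1 : Nat) : Int) = (2 + (k : Int)) + 1 := by push_cast; ring
      rw [hsplit, PySem.List.pyRange_one_succ_right (by omega), List.foldl_append,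
        ih d (by push_cast at hk ⊢; omega)]
      simp only [List.foldl_cons, List.foldl_nil]
      have hcast : (2 : Int) + (k : Int) = ((2 + k : Nat) : Int) := by push_cast; ring
      have hget : PySem.List.pyGetD s (2 + (k : Int)) ' ' = s.getD (2 + k) ' ' := by
        rw [hcast, PySem.List.pyGetD_natCast]
      have htn : ((2 : Int) + (k : Int) + 1).toNat = 2 + k + 1 := by omega
      have hA : pvAsum s idx (2 + (k + 1)) = pvAsum s idx (2 + k) + pvTerm s idx (2 + k) := rfl
      rw [hget, htn, hA]
      unfold pvTerm
      have hg1 : 2 ≤ 2 + k := by omega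
      have hg2 : ((2 + k : Nat) : Int) ≤ idx := by push_cast at hk ⊢; omega
      split_ifs with hc1 hc2 hc2
      · ring
      · exact absurd ⟨hg1, hg2, hc1⟩ hc2
      · exact absurd hc2.2.2 hc1
      · ring

lemma pvAsum_zero_of_small (s : List Char) (idx : Int) (h : idx ≤ 1) :
    ∀ i, pvAsum s idx i = 0 := by
  intro i
  induction i with
  | zero => rfl
  | succ i ih =>
      have ht : pvTerm s idx i = 0 := by
        unfold pvTerm
        split_ifs with hc
        · exfalso; have := hc.1; have := hc.2.1; omega
        · rfl
      simp [pvAsum, ih, ht]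

lemma pvAsum_stable (s : List Char) (idx : Int) :
    ∀ t, pvAsum s idx ((idx + 1).toNat + t) = pvAsum s idx (idx + 1).toNat := by
  intro t
  induction t with
  | zero => rfl
  | succ t ih =>
      have ht : pvTerm s idx ((idx + 1).toNat + t) = 0 := by
        unfold pvTerm
        split_ifs with hc
        · exfalso; have := hc.2.1; omega
        · rfl
      show pvAsum s idx ((idx + 1).toNat + t) + pvTerm s idx ((idx + 1).toNat + t) = _
      rw [ht, ih]; ring

-- ===== VERDICT (by name: the statement is the Claim_ definition above) =====
theorem d_py_spec : Claim_equal_d_py := by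
  intro n _
  unfold Spec_d_py
  simp only [d_py, d_py_alt]
  set s := pvBin (n - 2) with hs
  set idx := pvRfind0 (s.take (s.length - 2)) with hidxdef
  have hne : s ≠ [] := pvBin_ne_nil (n - 2)
  have hlen : 1 ≤ s.length := List.length_pos_iff.mpr hne
  have hbits : ∀ c ∈ s.drop 1, c = '0' ∨ c = '1' := pvBin_tail_bits (n - 2)
  have hub : idx ≤ ((s.length - 2 : Nat) : Int) - 1 := by
    have h1 := pvRfind0_le (s.take (s.length - 2))
    have h2 : (s.take (s.length - 2)).length = s.length - 2 := by
      rw [List.length_take]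
      exact Nat.min_eq_left (by omega)
    rw [h2] at h1
    omega
  -- B side
  have hz : (0 : Nat) = s.length - (s.length - 1 + 1) := by omega
  have hnil : s.drop (s.length - 1 + 1) = [] := by
    apply List.drop_eq_nil_of_le; omega
  have hB : pvAltGo s idx (s.length - 1) 0 0 0 = 0 + pvAsum s idx (s.length - 1 + 1) := by
    rw [hz]
    exact altGo_eq s idx hbits (s.length - 1) 0 0 (by omega) (by rw [hnil]; rfl)
  have hlen1 : s.length - 1 + 1 = s.length := by omega
  rw [hB, hlen1, zero_add]
  -- A side
  by_cases hsmall : idx ≤ 1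
  · rw [PySem.List.pyRange_one_eq_nil (by omega)]
    simp [pvAsum_zero_of_small s idx hsmall]
  · have hk : (2 : Int) + ((idx - 1).toNat : Int) = idx + 1 := by omega
    have hAf := afold s idx (idx - 1).toNat 0 (by omega)
    rw [hk] at hAf
    rw [hAf, zero_add]
    have h2k : 2 + (idx - 1).toNat = (idx + 1).toNat := by omega
    have hlensplit : s.length = (idx + 1).toNat + (s.length - (idx + 1).toNat) := by omega
    rw [h2k, hlensplit, pvAsum_stable]
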